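-- pv_equiv track=rewrite | github.com/NaegleLab/SH2fp | fig_func_lib/plotting_functions.py | merge_sorted_lists
-- ===== SOURCE A (Python) =====
-- def merge_sorted_lists(list_of_lists):
--     master_index_list=[]
--     for i,new_list in enumerate(list_of_lists):
--         location_of_last_match = None
--         found_any_duplicate_flag = False
--         for pepstr in new_list:
--             if  master_index_list==[]: # if list is empty, just append first one
--                 master_index_list.append(pepstr)
--             elif pepstr in master_index_list:# if this peptide is a duplicate of one in the list already, update location
--                 found_any_duplicate_flag = True
--                 location_of_last_match = master_index_list.index(pepstr)+1 # record its position in master list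
--                 pass
--             else: # if list not empty, and this is not a dup, then insert at appropriate place in list
--                 if i>0 and found_any_duplicate_flag: # if at least one peptide from the list matched the master already
--                     #insert it after that location
--                     master_index_list = master_index_list[:location_of_last_match]+[pepstr]+master_index_list[location_of_last_match:]
--                 else: #add at the end
--                     master_index_list.append(pepstr)
--     return master_index_list
-- ===== SOURCE B (Python) =====
-- def merge_sorted_lists(list_of_lists):
--     # Two staged passes per list instead of A's in-place splicing:
--     # pass 1 classifies each element (append-tail, or a bucket keyed by the
--     # last matched element); pass 2 stitches the buckets into the master with
--     # an explicit stack (forest expansion) - no index()/slice splices at all.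
--     master = []
--     seen = set()
--     for i, new_list in enumerate(list_of_lists):
--         buckets = {}
--         tail = []
--         anchor = None
--         for p in new_list:
--             if p in seen:
--                 anchor = p
--             elif i > 0 and anchor is not None:
--                 buckets.setdefault(anchor, []).append(p)
--                 seen.add(p)
--             else:
--                 tail.append(p)
--                 seen.add(p)
--         out = []
--         stack = master + tail
--         stack.reverse()
--         while stack:
--             e = stack.pop()
--             out.append(e)
--             stack.extend(buckets.pop(e, []))
--         master = out
--     return master
-- ===== Notes on version B (the rewrite author's own statement) =====
-- stated objective: faster
-- what changed: B replaces A's element-by-element splicing (a linear membership scan, .index scan and slice-copy per element) with two staged passes per list: one pass classifies each element into an append tail or a per-anchor bucket dict using a seen-set, then one explicit-stack expansion pass stitches all buckets into the master at once.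
import Mathlib
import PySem

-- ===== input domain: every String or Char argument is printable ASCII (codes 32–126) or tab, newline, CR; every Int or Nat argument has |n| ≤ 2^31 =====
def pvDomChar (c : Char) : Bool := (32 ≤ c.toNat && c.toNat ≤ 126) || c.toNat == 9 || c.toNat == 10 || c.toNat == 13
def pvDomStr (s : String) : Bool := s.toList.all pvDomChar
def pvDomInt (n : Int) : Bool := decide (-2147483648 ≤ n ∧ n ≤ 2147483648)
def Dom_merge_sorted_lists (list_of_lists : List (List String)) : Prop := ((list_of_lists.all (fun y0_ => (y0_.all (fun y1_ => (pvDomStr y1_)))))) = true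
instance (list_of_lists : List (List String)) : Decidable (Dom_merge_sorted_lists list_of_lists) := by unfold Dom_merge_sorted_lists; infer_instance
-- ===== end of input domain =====

-- B replaces A's element-by-element slice splicing with two staged passes per
-- list: classify elements into per-anchor buckets, then stitch the buckets in
-- with one explicit-stack expansion pass.

-- ===== PORT A =====
-- inner-loop body of A: state (master_index_list, location_of_last_match, found_any_duplicate_flag)
def pvAStep (i : Int) (st : List String × Option Int × Bool) (pepstr : String) :
    List String × Option Int × Bool :=
  match st with
  | (m, loc, flag) =>
    if m = [] then (m ++ [pepstr], loc, flag)
    else if pepstr ∈ m then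
      -- master_index_list.index(pepstr)+1 : pepstr ∈ m, so index? is some (getD never defaults)
      (m, some (((PySem.List.index? m pepstr).getD 0 : Int) + 1), true)
    else if i > 0 ∧ flag then
      (PySem.List.slice m none loc ++ [pepstr] ++ PySem.List.slice m loc none, loc, flag)
    else (m ++ [pepstr], loc, flag)

def merge_sorted_lists (list_of_lists : List (List String)) : List String :=
  (PySem.List.enumerate list_of_lists 0).foldl
    (fun master p => (p.2.foldl (pvAStep p.1) (master, none, false)).1)
    []

-- ===== PORT B =====
-- classification pass: state (buckets, tail, anchor, seen)
def pvBStep (i : Int)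
    (st : PySem.Dict String (List String) × List String × Option String × PySem.Set String)
    (p : String) :
    PySem.Dict String (List String) × List String × Option String × PySem.Set String :=
  match st with
  | (bk, tl, anc, seen) =>
    if PySem.Set.contains seen p then (bk, tl, some p, seen)
    else if i > 0 ∧ anc.isSome then
      match anc with
      | some a => (bk.modify a [] (· ++ [p]), tl, anc, PySem.Set.add seen p)
      | none => (bk, tl, anc, seen)  -- unreachable: guarded by anc.isSome
    else (bk, tl ++ [p], anc, PySem.Set.add seen p)

-- total length of the bucket lists (only used to bound the stack loop below)
def pvMass (bk : PySem.Dict String (List String)) : Nat :=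
  (bk.items.map (fun pr => pr.2.length)).sum

-- the 'while stack: e = stack.pop(); out.append(e); stack.extend(buckets.pop(e, []))'
-- loop, stack held top-first; the Nat argument is a termination guard only
def pvExpandF : Nat → PySem.Dict String (List String) → List String → List String
  | 0, _, _ => []
  | _ + 1, _, [] => []
  | f + 1, bk, e :: st =>
    match bk.pop? e with
    | some (v, bk') => e :: pvExpandF f bk' (v.reverse ++ st)
    | none => e :: pvExpandF f bk st

def pvExpand (bk : PySem.Dict String (List String)) (stack : List String) : List String :=
  pvExpandF (stack.length + pvMass bk) bk stack

def merge_sorted_lists_alt (list_of_lists : List (List String)) : List String :=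
  ((PySem.List.enumerate list_of_lists 0).foldl
    (fun (st : List String × PySem.Set String) (pr : Int × List String) =>
      let c := pr.2.foldl (pvBStep pr.1) (PySem.Dict.empty, [], none, st.2)
      (pvExpand c.1 (st.1 ++ c.2.1), c.2.2.2))
    ([], PySem.Set.empty)).1

-- ===== PRECONDITION & SPEC =====
def Spec_merge_sorted_lists (list_of_lists : List (List String)) (out : List String) : Prop := out = merge_sorted_lists_alt list_of_lists
instance (list_of_lists : List (List String)) (out : List String) : Decidable (Spec_merge_sorted_lists list_of_lists out) := by unfold Spec_merge_sorted_lists; infer_instance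

-- ===== CLAIM (what is proved, stated in full; the proofs are below) =====
def Claim_equal_merge_sorted_lists : Prop := ∀ (list_of_lists : List (List String)), Dom_merge_sorted_lists list_of_lists → Spec_merge_sorted_lists list_of_lists (merge_sorted_lists list_of_lists)

-- ===== LEMMAS AND PROOFS =====

theorem pvIfFun (a : String) (w : List String) :
    (fun p : String × List String => if p.1 == a then (a, w) else p)
      = (fun p => if p.1 = a then (a, w) else p) := by
  funext p; simp only [beq_iff_eq]

theorem pvFilterMap (l : List (String × List String)) (a : String) (w : List String) :
    (l.map (fun p => if p.1 = a then (a, w) else p)).filter (fun p => !p.1 == a)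
      = l.filter (fun p => !p.1 == a) := by
  induction l with
  | nil => rfl
  | cons q rest ih =>
    simp only [List.map_cons, List.filter_cons]
    rcases eq_or_ne q.1 a with hq | hq
    · simpa [hq] using ih
    · simpa [hq] using ih

theorem pvFilterMapComm (l : List (String × List String)) (a e : String) (w : List String)
    (h : e ≠ a) :
    (l.map (fun p => if p.1 = a then (a, w) else p)).filter (fun p => !p.1 == e)
      = (l.filter (fun p => !p.1 == e)).map (fun p => if p.1 = a then (a, w) else p) := by
  induction l with
  | nil => rfl
  | cons q rest ih =>
    simp only [List.map_cons, List.filter_cons]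
    rcases eq_or_ne q.1 a with hq | hq
    · have hqe : q.1 ≠ e := fun hh => h (hq ▸ hh ▸ rfl)
      rw [if_pos hq]
      rw [if_pos (show (!((a, w).1 == e)) = true by simp [Ne.symm h]),
        if_pos (show (!(q.1 == e)) = true by simp [hqe])]
      simp only [List.map_cons, if_pos hq]
      rw [ih]
    · rw [if_neg hq]
      by_cases he : q.1 = e
      · rw [if_neg (show ¬ (!(q.1 == e)) = true by simp [he]),
          if_neg (show ¬ (!(q.1 == e)) = true by simp [he])]
        exact ih
      · rw [if_pos (show (!(q.1 == e)) = true by simp [he]),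
          if_pos (show (!(q.1 == e)) = true by simp [he])]
        simp only [List.map_cons, if_neg hq]
        rw [ih]

theorem pvEraseInsert_self (d : PySem.Dict String (List String)) (a : String) (w : List String) :
    (d.insert a w).erase a = d.erase a := by
  apply PySem.Dict.ext
  simp only [PySem.Dict.erase, PySem.Dict.insert]
  split
  · rw [pvIfFun]; exact pvFilterMap d.items a w
  · simp [List.filter_append]

theorem pvContainsErase_ne (d : PySem.Dict String (List String)) (e x : String) (h : x ≠ e) :
    (d.erase e).contains x = d.contains x := by
  simp only [PySem.Dict.contains, PySem.Dict.erase]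
  induction d.items with
  | nil => rfl
  | cons q rest ih =>
    rcases eq_or_ne q.1 e with hq | hq
    · rw [List.filter_cons_of_neg (by simp [hq]), List.any_cons]
      simp [ih, Ne.symm h, hq]
    · rw [List.filter_cons_of_pos (by simp [hq]), List.any_cons, List.any_cons, ih]

theorem pvEraseInsert_comm (d : PySem.Dict String (List String)) (a e : String)
    (w : List String) (h : e ≠ a) :
    (d.insert a w).erase e = (d.erase e).insert a w := by
  have hc : (d.erase e).contains a = d.contains a := pvContainsErase_ne d e a (Ne.symm h)
  rcases hca : d.contains a with _ | _
  · rw [hca] at hc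
    have h1 : d.insert a w = PySem.Dict.mk (d.items ++ [(a, w)]) := by
      simp [PySem.Dict.insert, hca]
    have h2 : (d.erase e).insert a w = PySem.Dict.mk ((d.erase e).items ++ [(a, w)]) := by
      simp [PySem.Dict.insert, hc]
    rw [h1, h2]
    apply PySem.Dict.ext
    simp only [PySem.Dict.erase, List.filter_append]
    rw [List.filter_cons_of_pos (by simp [Ne.symm h])]
    simp
  · rw [hca] at hc
    have h1 : d.insert a w = PySem.Dict.mk (d.items.map (fun p => if p.1 = a then (a, w) else p)) := by
      simp only [PySem.Dict.insert, hca, if_pos rfl]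
      rw [pvIfFun]
      simp
    have h2 : (d.erase e).insert a w
        = PySem.Dict.mk ((d.erase e).items.map (fun p => if p.1 = a then (a, w) else p)) := by
      simp only [PySem.Dict.insert, hc, if_pos rfl]
      rw [pvIfFun]
      simp
    rw [h1, h2]
    apply PySem.Dict.ext
    simp only [PySem.Dict.erase]
    exact pvFilterMapComm d.items a e w h

theorem pvMassFilterNoKey (l : List (String × List String)) (e : String)
    (h : ∀ p ∈ l, p.1 ≠ e) : l.filter (fun p => !p.1 == e) = l :=
  List.filter_eq_self.mpr (fun p hp => by simp [h p hp])

theorem pvMassEraseList (l : List (String × List String)) (e : String) (v : List String)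
    (hnd : (l.map Prod.fst).Nodup)
    (h : (l.find? (fun p => p.1 == e)).map (fun x => x.2) = some v) :
    ((l.filter (fun p => !p.1 == e)).map (fun pr => pr.2.length)).sum + v.length
      = (l.map (fun pr => pr.2.length)).sum := by
  induction l with
  | nil => simp at h
  | cons q rest ih =>
    rcases eq_or_ne q.1 e with hq | hq
    · rw [List.find?_cons_of_pos (by simp [hq])] at h
      simp only [Option.map_some, Option.some.injEq] at h
      subst h
      rw [List.filter_cons_of_neg (by simp [hq])]
      have hnk : ∀ p ∈ rest, p.1 ≠ e := by
        intro p hp hpe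
        simp only [List.map_cons, List.nodup_cons] at hnd
        exact hnd.1 (hq ▸ hpe ▸ List.mem_map_of_mem hp)
      rw [pvMassFilterNoKey rest e hnk]
      simp [Nat.add_comm]
    · rw [List.find?_cons_of_neg (by simp [hq])] at h
      rw [List.filter_cons_of_pos (by simp [hq])]
      simp only [List.map_cons, List.sum_cons]
      have := ih (by simp only [List.map_cons, List.nodup_cons] at hnd; exact hnd.2) h
      omega

theorem pvMassErase (d : PySem.Dict String (List String)) (e : String) (v : List String)
    (hnd : d.keys.Nodup) (h : d.get? e = some v) :
    pvMass (d.erase e) + v.length = pvMass d := by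
  exact pvMassEraseList d.items e v hnd h

theorem pvMassMapList (l : List (String × List String)) (a : String) (w : List String)
    (hnd : (l.map Prod.fst).Nodup) (v : List String)
    (h : (l.find? (fun p => p.1 == a)).map (fun x => x.2) = some v) :
    ((l.map (fun p => if p.1 = a then (a, w) else p)).map (fun pr => pr.2.length)).sum + v.length
      = (l.map (fun pr => pr.2.length)).sum + w.length := by
  induction l with
  | nil => simp at h
  | cons q rest ih =>
    rcases eq_or_ne q.1 a with hq | hq
    · rw [List.find?_cons_of_pos (by simp [hq])] at h
      simp only [Option.map_some, Option.some.injEq] at h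
      subst h
      have hnk : ∀ p ∈ rest, p.1 ≠ a := by
        intro p hp hpe
        simp only [List.map_cons, List.nodup_cons] at hnd
        exact hnd.1 (hq ▸ hpe ▸ List.mem_map_of_mem hp)
      have hmap : rest.map (fun p => if p.1 = a then (a, w) else p) = rest := by
        have hid : ∀ p ∈ rest, (if p.1 = a then (a, w) else p) = p :=
          fun p hp => if_neg (hnk p hp)
        rw [List.map_congr_left hid, List.map_id_fun']
        rfl
      simp only [List.map_cons, if_pos hq, hmap, List.sum_cons]
      omega
    · rw [List.find?_cons_of_neg (by simp [hq])] at h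
      simp only [List.map_cons, if_neg hq, List.sum_cons]
      have := ih (by simp only [List.map_cons, List.nodup_cons] at hnd; exact hnd.2) h
      omega

theorem pvMassInsertAppend (d : PySem.Dict String (List String)) (a : String) (p : String)
    (hnd : d.keys.Nodup) :
    pvMass (d.insert a (d.getD a [] ++ [p])) = pvMass d + 1 := by
  unfold pvMass
  rcases hca : d.contains a with _ | _
  · have hget : d.get? a = none := (PySem.Dict.get?_eq_none_iff_contains d a).mpr hca
    have hgd : d.getD a [] = [] := by simp [PySem.Dict.getD, hget]
    have h1 : d.insert a (d.getD a [] ++ [p])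
        = PySem.Dict.mk (d.items ++ [(a, d.getD a [] ++ [p])]) := by
      simp [PySem.Dict.insert, hca]
    rw [h1]
    simp [hgd]
  · have hget : (d.get? a).isSome := by
      rcases hv : d.get? a with _ | v
      · rw [(PySem.Dict.get?_eq_none_iff_contains d a).mp hv] at hca; cases hca
      · rfl
    rcases Option.isSome_iff_exists.mp hget with ⟨v, hv⟩
    have hgd : d.getD a [] = v := by simp [PySem.Dict.getD, hv]
    have h1 : d.insert a (d.getD a [] ++ [p])
        = PySem.Dict.mk (d.items.map (fun q => if q.1 = a then (a, d.getD a [] ++ [p]) else q)) := by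
      simp only [PySem.Dict.insert, hca, if_pos rfl]
      rw [pvIfFun]
      simp
    rw [h1]
    have hmm := pvMassMapList d.items a (d.getD a [] ++ [p]) hnd v hv
    have hlen : (d.getD a [] ++ [p]).length = v.length + 1 := by simp [hgd]
    show ((d.items.map (fun q => if q.1 = a then (a, d.getD a [] ++ [p]) else q)).map
        (fun pr => pr.2.length)).sum = (d.items.map (fun pr => pr.2.length)).sum + 1
    omega

theorem pvExpandF_nil (f : Nat) (bk : PySem.Dict String (List String)) :
    pvExpandF f bk [] = [] := by
  cases f <;> rfl

theorem pvPopNone (bk : PySem.Dict String (List String)) (e : String)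
    (h : bk.contains e = false) : bk.pop? e = none := by
  simp [PySem.Dict.pop?, (PySem.Dict.get?_eq_none_iff_contains bk e).mpr h]

theorem pvExpandF_empty (f : Nat) (s : List String) (h : s.length ≤ f) :
    pvExpandF f PySem.Dict.empty s = s := by
  induction f generalizing s with
  | zero =>
    cases s with
    | nil => rfl
    | cons e st => simp at h
  | succ f ih =>
    cases s with
    | nil => rfl
    | cons e st =>
      show pvExpandF (f + 1) PySem.Dict.empty (e :: st) = e :: st
      rw [pvExpandF]
      rw [pvPopNone _ _ (by simp [PySem.Dict.contains, PySem.Dict.empty])]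
      simp only []
      rw [ih st (by simpa using h)]

theorem pvGetErase_ne (d : PySem.Dict String (List String)) (e x : String) (h : x ≠ e) :
    (d.erase e).get? x = d.get? x := by
  simp only [PySem.Dict.get?, PySem.Dict.erase]
  congr 1
  induction d.items with
  | nil => rfl
  | cons q rest ih =>
    rcases eq_or_ne q.1 e with hq | hq
    · rw [List.filter_cons_of_neg (by simp [hq]),
        List.find?_cons_of_neg (by simp [hq, Ne.symm h])]
      exact ih
    · rw [List.filter_cons_of_pos (by simp [hq])]
      by_cases hx : q.1 = x
      · rw [List.find?_cons_of_pos (by simp [hx]), List.find?_cons_of_pos (by simp [hx])]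
      · rw [List.find?_cons_of_neg (by simp [hx]), List.find?_cons_of_neg (by simp [hx])]
        exact ih

theorem pvNodupErase (d : PySem.Dict String (List String)) (e : String)
    (h : d.keys.Nodup) : (d.erase e).keys.Nodup := by
  simp only [PySem.Dict.keys, PySem.Dict.erase]
  exact h.sublist (List.filter_sublist.map _)

theorem pvEraseNotContains (d : PySem.Dict String (List String)) (k : String)
    (h : d.contains k = false) : d.erase k = d := by
  apply PySem.Dict.ext
  simp only [PySem.Dict.erase, PySem.Dict.contains, List.any_eq_false] at *
  exact List.filter_eq_self.mpr (fun p hp => by simpa using h p hp)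

theorem pvContainsErase_false (d : PySem.Dict String (List String)) (e x : String)
    (h : d.contains x = false) : (d.erase e).contains x = false := by
  by_cases hx : x = e
  · subst hx
    simp only [PySem.Dict.contains, PySem.Dict.erase, List.any_eq_false] at *
    intro p hp
    rcases List.mem_filter.mp hp with ⟨hp1, hp2⟩
    exact h p hp1
  · rw [pvContainsErase_ne d e x hx]; exact h

-- appending p to anchor a's bucket inserts p right after the first a in the expansion
theorem pvExpandF_insert (f : Nat) (bk : PySem.Dict String (List String)) (s : List String)
    (a p : String) (pre suf : List String)
    (hnd : bk.keys.Nodup) (hf : s.length + pvMass bk ≤ f)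
    (hp : bk.contains p = false)
    (heq : pvExpandF f bk s = pre ++ a :: suf) (ha : a ∉ pre) :
    pvExpandF (f + 1) (bk.insert a (bk.getD a [] ++ [p])) s = pre ++ a :: p :: suf := by
  induction f generalizing bk s pre with
  | zero =>
    cases s with
    | nil => rw [pvExpandF_nil] at heq; simp at heq
    | cons e st => simp at hf
  | succ f ih =>
    cases s with
    | nil => rw [pvExpandF_nil] at heq; simp at heq
    | cons e st =>
      rw [pvExpandF] at heq
      rcases hpe : bk.pop? e with _ | vbk
      · -- e not a key of bk
        rw [hpe] at heq
        simp only [] at heq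
        have hgn : bk.get? e = none := by
          rcases hg : bk.get? e with _ | v
          · rfl
          · simp [PySem.Dict.pop?, hg] at hpe
        cases pre with
        | nil =>
          simp only [List.nil_append] at heq
          injection heq with h1 h2
          subst h1
          -- e = a, e was not a key: new bucket [p]
          have hgd : bk.getD e [] = [] := by simp [PySem.Dict.getD, hgn]
          rw [pvExpandF]
          rw [show (bk.insert e (bk.getD e [] ++ [p])).pop? e
              = some (bk.getD e [] ++ [p], bk.erase e) by
            simp [PySem.Dict.pop?, PySem.Dict.get?_insert_self, pvEraseInsert_self]]
          have hbe : bk.erase e = bk := pvEraseNotContains bk e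
            ((PySem.Dict.get?_eq_none_iff_contains bk e).mp hgn)
          simp only [hgd, List.nil_append, List.reverse_cons, List.reverse_nil, hbe,
            List.singleton_append]
          rw [pvExpandF]
          rw [pvPopNone bk p hp]
          rw [h2]
        | cons e' pre' =>
          simp only [List.cons_append] at heq
          injection heq with h1 h2
          subst h1
          have hea : e ≠ a := fun hh => ha (hh ▸ List.mem_cons_self)
          rw [pvExpandF]
          rw [show (bk.insert a (bk.getD a [] ++ [p])).pop? e = none by
            apply pvPopNone
            rw [PySem.Dict.contains_insert]
            have hb1 : (e == a) = false := by simp [hea]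
            have hb2 : bk.contains e = false :=
              (PySem.Dict.get?_eq_none_iff_contains bk e).mp hgn
            rw [hb1, hb2]
            rfl]
          rw [ih bk st pre' hnd (by simp only [List.length_cons] at hf; omega) hp h2
            (fun hh => ha (List.mem_cons_of_mem _ hh))]
          exact List.cons_append.symm
      · -- e is a key of bk
        obtain ⟨v, bk'⟩ := vbk
        rw [hpe] at heq
        simp only [] at heq
        have hg : bk.get? e = some v ∧ bk' = bk.erase e := by
          rcases hgg : bk.get? e with _ | w
          · simp [PySem.Dict.pop?, hgg] at hpe
          · have h12 : w = v ∧ bk.erase e = bk' := by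
              simpa [PySem.Dict.pop?, hgg] using hpe
            exact ⟨by rw [h12.1], h12.2.symm⟩
        obtain ⟨hgv, hbk'⟩ := hg
        have hndE : bk'.keys.Nodup := hbk' ▸ pvNodupErase bk e hnd
        have hmass : pvMass bk' + v.length = pvMass bk := hbk' ▸ pvMassErase bk e v hnd hgv
        have hfE : (v.reverse ++ st).length + pvMass bk' ≤ f := by
          simp only [List.length_append, List.length_reverse, List.length_cons] at hf ⊢
          omega
        cases pre with
        | nil =>
          simp only [List.nil_append] at heq
          injection heq with h1 h2
          subst h1
          -- e = a is a key with value v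
          have hgd : bk.getD e [] = v := by simp [PySem.Dict.getD, hgv]
          rw [pvExpandF]
          rw [show (bk.insert e (bk.getD e [] ++ [p])).pop? e
              = some (bk.getD e [] ++ [p], bk.erase e) by
            simp [PySem.Dict.pop?, PySem.Dict.get?_insert_self, pvEraseInsert_self]]
          simp only [hgd, List.reverse_append, List.reverse_cons, List.reverse_nil,
            List.nil_append, List.cons_append, List.singleton_append]
          rw [pvExpandF]
          rw [pvPopNone (bk.erase e) p (pvContainsErase_false bk e p hp)]
          rw [← hbk', h2]
        | cons e' pre' =>
          simp only [List.cons_append] at heq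
          injection heq with h1 h2
          subst h1
          have hea : e ≠ a := fun hh => ha (hh ▸ List.mem_cons_self)
          rw [pvExpandF]
          rw [show (bk.insert a (bk.getD a [] ++ [p])).pop? e
              = some (v, (bk.erase e).insert a ((bk.erase e).getD a [] ++ [p])) by
            simp only [PySem.Dict.pop?]
            rw [PySem.Dict.get?_insert_of_ne _ _ hea, hgv]
            simp only [Option.map_some, Option.some.injEq, Prod.mk.injEq]
            refine ⟨by trivial, ?_⟩
            rw [pvEraseInsert_comm bk a e _ hea]
            congr 2
            simp [PySem.Dict.getD, pvGetErase_ne bk e a (Ne.symm hea)]]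
          have hpE : bk'.contains p = false := by
            rw [hbk']; exact pvContainsErase_false bk e p hp
          rw [← hbk']
          show e :: pvExpandF (f + 1) (bk'.insert a (bk'.getD a [] ++ [p])) (v.reverse ++ st)
              = e :: pre' ++ a :: p :: suf
          rw [ih bk' (v.reverse ++ st) pre' hndE hfE hpE h2
            (fun hh => ha (List.mem_cons_of_mem _ hh))]
          exact List.cons_append.symm


theorem pvSetMem (s : PySem.Set String) (x : String) :
    PySem.Set.contains s x = true ↔ x ∈ s := by
  simp [PySem.Set.contains, List.contains_iff_mem]

theorem pvSetAddMem (s : PySem.Set String) (x y : String) :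
    PySem.Set.contains (PySem.Set.add s y) x = true ↔ x = y ∨ PySem.Set.contains s x = true := by
  rw [pvSetMem, pvSetMem, PySem.Set.mem_add]
  tauto

theorem pvMassEmpty : pvMass PySem.Dict.empty = 0 := rfl

theorem pvExpandEmpty (st : List String) : pvExpand PySem.Dict.empty st = st := by
  unfold pvExpand
  exact pvExpandF_empty _ _ (by simp [pvMassEmpty])

-- ---- the coupling invariant between A's round state and B's round state ----

def pvInvB (i : Int) (m0 : List String) (M : List String) (loc : Option Int) (flag : Bool)
    (bk : PySem.Dict String (List String)) (tl : List String) (anc : Option String)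
    (seen : PySem.Set String) : Prop :=
  M = pvExpand bk (m0 ++ tl) ∧
  (∀ x, PySem.Set.contains seen x = true ↔ x ∈ M) ∧
  M.Nodup ∧
  (flag = true ↔ anc.isSome = true) ∧
  (∀ a, anc = some a → ∃ k, PySem.List.index? M a = some k ∧ loc = some ((k : Int) + 1)) ∧
  (∀ x, bk.contains x = true → x ∈ M) ∧
  (bk = PySem.Dict.empty ∨ (0 < i ∧ anc.isSome = true)) ∧
  bk.keys.Nodup

theorem pvStep_inv (i : Int) (p : String) (m0 M : List String) (loc : Option Int) (flag : Bool)
    (bk : PySem.Dict String (List String)) (tl : List String) (anc : Option String)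
    (seen : PySem.Set String)
    (h : pvInvB i m0 M loc flag bk tl anc seen) :
    pvInvB i m0 (pvAStep i (M, loc, flag) p).1 (pvAStep i (M, loc, flag) p).2.1
      (pvAStep i (M, loc, flag) p).2.2
      (pvBStep i (bk, tl, anc, seen) p).1 (pvBStep i (bk, tl, anc, seen) p).2.1
      (pvBStep i (bk, tl, anc, seen) p).2.2.1 (pvBStep i (bk, tl, anc, seen) p).2.2.2 := by
  obtain ⟨h1, h2, h3, h4, h5, h6, h7, h8⟩ := h
  by_cases hmem : p ∈ M
  · -- duplicate: A records loc, B records the anchor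
    have hM : M ≠ [] := by intro hh; rw [hh] at hmem; exact absurd hmem (List.not_mem_nil)
    have hcp : PySem.Set.contains seen p = true := (h2 p).mpr hmem
    simp only [pvAStep, pvBStep, if_neg hM, if_pos hmem, hcp, if_pos rfl]
    obtain ⟨k, hk⟩ := Option.isSome_iff_exists.mp ((PySem.List.index?_isSome_iff M p).mpr hmem)
    refine ⟨h1, h2, h3, by simp, ?_, h6, ?_, h8⟩
    · intro a ha
      injection ha with ha
      subst ha
      exact ⟨k, hk, by rw [hk]; rfl⟩
    · rcases h7 with h7 | h7
      · exact Or.inl h7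
      · exact Or.inr ⟨h7.1, rfl⟩
  · have hcp : PySem.Set.contains seen p = false := by
      rw [← Bool.not_eq_true, h2 p]; exact hmem
    by_cases hif : i > 0 ∧ flag = true
    · -- insertion after the anchor
      obtain ⟨a, hanc⟩ := Option.isSome_iff_exists.mp (h4.mp hif.2)
      subst hanc
      obtain ⟨k, hk, hloc⟩ := h5 a rfl
      subst hloc
      obtain ⟨pre, suf, hMeq, hkpre, hapre⟩ := (PySem.List.index?_eq_some_iff M a k).mp hk
      have hM : M ≠ [] := by rw [hMeq]; exact List.append_ne_nil_of_right_ne_nil _ (by simp)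
      have hifB : i > 0 ∧ (some a).isSome = true := ⟨hif.1, rfl⟩
      have hcpbk : bk.contains p = false := by
        rw [← Bool.not_eq_true]; exact fun hc => hmem (h6 p hc)
      have hstepA : pvAStep i (M, some ((k : Int) + 1), flag) p
          = (PySem.List.slice M none (some ((k : Int) + 1)) ++ [p]
              ++ PySem.List.slice M (some ((k : Int) + 1)) none, some ((k : Int) + 1), flag) := by
        simp [pvAStep, if_neg hM, if_neg hmem, hif]
      have hps : p ∉ seen := fun hh => hmem ((h2 p).mp ((pvSetMem seen p).mpr hh))
      have hstepB : pvBStep i (bk, tl, some a, seen) p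
          = (bk.modify a [] (· ++ [p]), tl, some a, PySem.Set.add seen p) := by
        simp [pvBStep, hps, hifB]
      rw [hstepA, hstepB]
      -- A's spliced list is pre ++ a :: p :: suf
      have hto : ((k : Int) + 1).toNat = k + 1 := by omega
      have hsl1 : PySem.List.slice M none (some ((k : Int) + 1)) = pre ++ [a] := by
        rw [PySem.List.slice_to _ (by omega), hto, hMeq, List.take_append]
        rw [List.take_of_length_le (by omega), hkpre]
        simp
      have hsl2 : PySem.List.slice M (some ((k : Int) + 1)) none = suf := by
        rw [PySem.List.slice_from _ (by omega), hto, hMeq, List.drop_append]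
        rw [List.drop_of_length_le (by omega), hkpre]
        simp
      have hAform : PySem.List.slice M none (some ((k : Int) + 1)) ++ [p]
          ++ PySem.List.slice M (some ((k : Int) + 1)) none = pre ++ a :: p :: suf := by
        rw [hsl1, hsl2]; simp
      -- B's re-expansion with the grown bucket
      have hexp : pvExpand (bk.modify a [] (· ++ [p])) (m0 ++ tl) = pre ++ a :: p :: suf := by
        show pvExpand (bk.insert a (bk.getD a [] ++ [p])) (m0 ++ tl) = pre ++ a :: p :: suf
        unfold pvExpand
        rw [pvMassInsertAppend bk a p h8]
        rw [show (m0 ++ tl).length + (pvMass bk + 1) = ((m0 ++ tl).length + pvMass bk) + 1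
          from by omega]
        exact pvExpandF_insert _ bk (m0 ++ tl) a p pre suf h8 (le_refl _) hcpbk
          (by rw [← pvExpand, ← h1, hMeq]) hapre
      have hnodup' : (pre ++ a :: p :: suf).Nodup := by
        have hmm : M.Nodup := h3
        rw [hMeq] at hmm hmem
        have h2m : ((pre ++ [a]) ++ p :: suf).Nodup := by
          rw [List.nodup_middle]
          rw [List.nodup_cons]
          refine ⟨fun hc => hmem ?_, by simpa using hmm⟩
          simp only [List.mem_append, List.mem_singleton] at hc
          simp only [List.mem_append, List.mem_cons]
          tauto
        simpa using h2m
      refine ⟨?_, ?_, by rw [hAform]; exact hnodup', by simp [h4], ?_, ?_,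
        Or.inr ⟨hif.1, rfl⟩, ?_⟩
      · rw [hAform]
        exact hexp.symm
      · intro x
        rw [hAform, pvSetAddMem, h2 x, hMeq]
        simp only [List.mem_append, List.mem_cons]
        tauto
      · intro a' ha'
        injection ha' with ha'
        subst ha'
        refine ⟨k, ?_, rfl⟩
        rw [hAform]
        exact (PySem.List.index?_eq_some_iff _ _ _).mpr ⟨pre, p :: suf, rfl, hkpre, hapre⟩
      · intro x hx
        rw [hAform]
        rw [show bk.modify a [] (· ++ [p]) = bk.insert a (bk.getD a [] ++ [p]) from rfl] at hx
        rw [PySem.Dict.contains_insert] at hx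
        simp only [Bool.or_eq_true, beq_iff_eq] at hx
        rcases hx with hx | hx
        · subst hx; simp
        · have := h6 x hx
          rw [hMeq] at this
          simp only [List.mem_append, List.mem_cons] at this ⊢
          tauto
      · exact PySem.Dict.nodup_keys_insert bk a _ h8
    · -- plain append at the end (covers the empty-master branch as well)
      have hifB : ¬ (i > 0 ∧ anc.isSome = true) := fun hh => hif ⟨hh.1, h4.mpr hh.2⟩
      have hbk : bk = PySem.Dict.empty := by
        rcases h7 with h7 | h7
        · exact h7
        · exact absurd ⟨h7.1, h7.2⟩ hifB
      have hMtl : M = m0 ++ tl := by rw [h1, hbk, pvExpandEmpty]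
      have hout : (pvAStep i (M, loc, flag) p).1 = M ++ [p] := by
        by_cases hM : M = []
        · simp [pvAStep, hM]
        · simp [pvAStep, if_neg hM, if_neg hmem, hcp, if_neg hif]
      have hps : p ∉ seen := fun hh => hmem ((h2 p).mp ((pvSetMem seen p).mpr hh))
      have houtB : pvBStep i (bk, tl, anc, seen) p
          = (bk, tl ++ [p], anc, PySem.Set.add seen p) := by
        simp [pvBStep, hps, hifB]
      have hAe : (pvAStep i (M, loc, flag) p).2.1 = loc ∧ (pvAStep i (M, loc, flag) p).2.2 = flag := by
        by_cases hM : M = []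
        · simp [pvAStep, hM]
        · simp [pvAStep, if_neg hM, if_neg hmem, hcp, if_neg hif]
      rw [houtB]
      refine ⟨?_, ?_, ?_, ?_, ?_, ?_, ?_, ?_⟩
      · rw [hout, hbk, pvExpandEmpty, hMtl]
        simp
      · intro x
        rw [hout, pvSetAddMem, h2 x]
        simp only [List.mem_append, List.mem_singleton]
        tauto
      · rw [hout]
        simp only [List.nodup_append, List.nodup_cons, List.nodup_nil]
        refine ⟨h3, by simp, ?_⟩
        intro x hx y hy hxy
        rw [List.mem_singleton] at hy
        rw [hxy, hy] at hx
        exact hmem hx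
      · rw [hAe.2]; exact h4
      · intro a ha
        obtain ⟨k, hk, hloc⟩ := h5 a ha
        have hamem : a ∈ M := (PySem.List.index?_isSome_iff M a).mp (by rw [hk]; rfl)
        rw [hout, hAe.1]
        exact ⟨k, by rw [PySem.List.index?_append_of_mem _ hamem]; exact hk, hloc⟩
      · intro x hx
        rw [hout]
        exact List.mem_append_left _ (h6 x hx)
      · exact Or.inl hbk
      · exact h8

theorem pvFold_inv (nl : List String) (i : Int) (m0 M : List String) (loc : Option Int)
    (flag : Bool) (bk : PySem.Dict String (List String)) (tl : List String)
    (anc : Option String) (seen : PySem.Set String)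
    (h : pvInvB i m0 M loc flag bk tl anc seen) :
    pvInvB i m0 (nl.foldl (pvAStep i) (M, loc, flag)).1 (nl.foldl (pvAStep i) (M, loc, flag)).2.1
      (nl.foldl (pvAStep i) (M, loc, flag)).2.2
      (nl.foldl (pvBStep i) (bk, tl, anc, seen)).1
      (nl.foldl (pvBStep i) (bk, tl, anc, seen)).2.1
      (nl.foldl (pvBStep i) (bk, tl, anc, seen)).2.2.1
      (nl.foldl (pvBStep i) (bk, tl, anc, seen)).2.2.2 := by
  induction nl generalizing M loc flag bk tl anc seen with
  | nil => exact h
  | cons p nl ih =>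
    simp only [List.foldl_cons]
    have h1 := pvStep_inv i p m0 M loc flag bk tl anc seen h
    exact ih _ _ _ _ _ _ _ h1

-- outer invariant: B's master equals A's and seen is the set of its elements
theorem pvOuter_inv (ls : List (List String)) (s : Int) (m : List String)
    (seen : PySem.Set String)
    (hseen : ∀ x, PySem.Set.contains seen x = true ↔ x ∈ m) (hnd : m.Nodup) :
    (PySem.List.enumerate ls s).foldl
        (fun master p => (p.2.foldl (pvAStep p.1) (master, none, false)).1) m =
    ((PySem.List.enumerate ls s).foldl
        (fun (st : List String × PySem.Set String) (pr : Int × List String) =>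
          let c := pr.2.foldl (pvBStep pr.1) (PySem.Dict.empty, [], none, st.2)
          (pvExpand c.1 (st.1 ++ c.2.1), c.2.2.2))
        (m, seen)).1 := by
  induction ls generalizing s m seen with
  | nil => rfl
  | cons nl ls ih =>
    rw [PySem.List.enumerate_cons]
    simp only [List.foldl_cons]
    have hI0 : pvInvB s m m none false PySem.Dict.empty [] none seen := by
      refine ⟨by rw [List.append_nil, pvExpandEmpty], hseen, hnd, by simp, by simp, ?_,
        Or.inl rfl, by simp [PySem.Dict.keys, PySem.Dict.empty]⟩
      intro x hx
      simp [PySem.Dict.contains, PySem.Dict.empty] at hx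
    have hF := pvFold_inv nl s m m none false PySem.Dict.empty [] none seen hI0
    obtain ⟨hw, hsn, hnd', -, -, -, -, -⟩ := hF
    rw [hw]
    exact ih (s + 1) _ _ (fun x => by rw [hsn x, hw]) (hw ▸ hnd')

-- ===== VERDICT (by name: the statement is the Claim_ definition above) =====
theorem merge_sorted_lists_spec : Claim_equal_merge_sorted_lists := by
  intro lol _
  unfold Spec_merge_sorted_lists merge_sorted_lists merge_sorted_lists_alt
  exact pvOuter_inv lol 0 [] PySem.Set.empty
    (by intro x; simp [PySem.Set.contains, PySem.Set.empty]) List.nodup_nil
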